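-- pv_equiv track=rewrite | github.com/sravez/dauphine | Info/code/EXTP/TP/TP2/EX_2.19.py | s3
-- ===== SOURCE A (Python) =====
-- def s3(n: int) -> int:
--     s = 0
--     red = max(1, n - 18)
--     while red <= min(6, n - 2) :
--         green = max(1, n - red - 10)
--         while green <= min(8, n - red - 1) :
--             s += 1
--             green += 1
--         red += 1
--     return s
-- ===== SOURCE B (Python) =====
-- def s3(n: int) -> int:
--     s = 0
--     for red in range(max(1, n - 18), min(6, n - 2) + 1):
--         lo = max(1, n - red - 10)
--         hi = min(8, n - red - 1)
--         s += max(0, hi - lo + 1)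
--     return s
-- ===== Notes on version B (the rewrite author's own statement) =====
-- stated objective: simpler
-- what changed: The inner while loop that counted valid green values one by one is replaced by a closed-form span count max(0, hi-lo+1) inside a single for loop over red.
import Mathlib
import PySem

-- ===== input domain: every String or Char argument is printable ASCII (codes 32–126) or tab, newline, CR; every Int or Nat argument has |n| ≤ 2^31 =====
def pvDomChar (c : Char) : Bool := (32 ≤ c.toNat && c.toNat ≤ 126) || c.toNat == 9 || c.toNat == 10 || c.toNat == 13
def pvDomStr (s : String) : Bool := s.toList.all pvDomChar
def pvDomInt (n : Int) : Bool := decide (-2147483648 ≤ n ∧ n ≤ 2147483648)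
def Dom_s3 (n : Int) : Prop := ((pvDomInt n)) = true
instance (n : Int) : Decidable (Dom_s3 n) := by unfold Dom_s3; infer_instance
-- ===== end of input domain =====

-- B replaces A's inner counting while-loop by a closed-form span count (objective: simpler).

-- ===== PORT A =====
-- inner while loop: 'while green <= hi: s += 1; green += 1'
def s3InnerA (green hi s : Int) : Int :=
  if _h : green ≤ hi then s3InnerA (green + 1) hi (s + 1) else s
termination_by (hi + 1 - green).toNat
decreasing_by omega

-- outer while loop: 'while red <= min(6, n-2): <inner loop>; red += 1'
def s3OuterA (n red s : Int) : Int :=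
  if _h : red ≤ min 6 (n - 2) then
    s3OuterA n (red + 1) (s3InnerA (max 1 (n - red - 10)) (min 8 (n - red - 1)) s)
  else s
termination_by (min 6 (n - 2) + 1 - red).toNat
decreasing_by omega

def s3 (n : Int) : Int := s3OuterA n (max 1 (n - 18)) 0

-- ===== PORT B =====
def s3_alt (n : Int) : Int :=
  (PySem.List.pyRange (max 1 (n - 18)) (min 6 (n - 2) + 1) 1).foldl
    (fun s red => s + max 0 (min 8 (n - red - 1) - max 1 (n - red - 10) + 1)) 0

-- ===== PRECONDITION & SPEC =====
def Spec_s3 (n : Int) (out : Int) : Prop := out = s3_alt n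
instance (n : Int) (out : Int) : Decidable (Spec_s3 n out) := by unfold Spec_s3; infer_instance

-- ===== CLAIM (what is proved, stated in full; the proofs are below) =====
def Claim_equal_s3 : Prop := ∀ (n : Int), Dom_s3 n → Spec_s3 n (s3 n)

-- ===== LEMMAS AND PROOFS =====

theorem s3InnerA_eq (green hi s : Int) : s3InnerA green hi s = s + max 0 (hi + 1 - green) := by
  by_cases h : green ≤ hi
  · rw [s3InnerA, dif_pos h, s3InnerA_eq (green + 1) hi (s + 1)]
    omega
  · rw [s3InnerA, dif_neg h]
    omega
termination_by (hi + 1 - green).toNat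
decreasing_by omega

theorem pyRange_one_nil (a b : Int) (h : b ≤ a) : PySem.List.pyRange a b 1 = [] := by
  rw [PySem.List.pyRange_one]
  have : (b - a).toNat = 0 := by omega
  simp [this]

theorem s3OuterA_eq (n red s : Int) :
    s3OuterA n red s =
      (PySem.List.pyRange red (min 6 (n - 2) + 1) 1).foldl
        (fun s red => s + max 0 (min 8 (n - red - 1) - max 1 (n - red - 10) + 1)) s := by
  by_cases h : red ≤ min 6 (n - 2)
  · rw [s3OuterA, dif_pos h, s3OuterA_eq n (red + 1),
      PySem.List.pyRange_one_cons (by omega : red < min 6 (n - 2) + 1)]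
    simp [List.foldl_cons, s3InnerA_eq]
    congr 1
    omega
  · rw [s3OuterA, dif_neg h, pyRange_one_nil _ _ (by omega)]
    rfl
termination_by (min 6 (n - 2) + 1 - red).toNat
decreasing_by omega

-- ===== VERDICT (by name: the statement is the Claim_ definition above) =====
theorem s3_spec : Claim_equal_s3 := by
  intro n _
  unfold Spec_s3 s3 s3_alt
  exact s3OuterA_eq n (max 1 (n - 18)) 0
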